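-- pv_equiv track=rewrite | github.com/Thomas-Risola/Choose-your-opponent | tirage_8e_8dec.py | solution_possible
-- ===== SOURCE A (Python) =====
-- def tirage_possible(equipe, W):
--     W_possible = []
--     for winner in W:
--         if ((winner[1] != equipe[1]) and (winner[2] != equipe[2])):
--             W_possible.append(winner)
--     return W_possible
--
-- def remove(winner, W):
--     W_restant = []
--     for equipe in W:
--         if (equipe != winner):
--             W_restant.append(equipe)
--     return W_restant
--
-- def solution_possible(W, S):
--     if (len(S) == 0):
--         return True
--     if (len(S) == 1):
--         if (tirage_possible(S[0], W) == []):
--             return False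
--         return True
--     else:
--         possible = False  # si possible est false, on n'a pas encore trouvé de solution pour le tirage au sort avec
--         # ce W et ce S
--         for j in range(len(S)):
--             if not possible:
--                 W_possible = tirage_possible(S[j], W)
--                 if (len(W_possible) == 0):  # pas d'équipes de W que S peut rencontrer, donc pas de solution encore
--                     possible = possible or False
--                 else:
--                     for i in range(len(W_possible)):
--                         possible = possible or (solution_possible(remove(W_possible[i], W), remove(S[j], S)))
--         return possible
-- ===== SOURCE B (Python) =====
-- def solution_possible(W, S):
--     def compatible(s, w):
--         return w[1] != s[1] and w[2] != s[2]
--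
--     # most-constrained-first: try the S-teams with the fewest compatible opponents first
--     order = sorted(S, key=lambda s: sum(1 for w in W if compatible(s, w)))
--
--     def solve(W, S):
--         if not S:
--             return True
--         s = S[0]
--         return any(solve(W[:k] + W[k + 1:], S[1:])
--                    for k, w in enumerate(W) if compatible(s, w))
--
--     return solve(W, order)
-- ===== Notes on version B (the rewrite author's own statement) =====
-- stated objective: alternative
-- what changed: B backtracks only on the first still-unassigned team of S (after ordering S most-constrained-first) instead of A's branching over every remaining position of S at every recursion level, and removes the chosen opponent by index.
-- outside the precondition, e.g. on solution_possible([[0, 1, 2]], [[9, 2, 3], [9, 2, 3]]): A returns True, B returns False; on solution_possible([[0, 1, 2], [0, 1, 2]], [[9, 2, 3], [8, 3, 4]]): A returns False, B returns True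
import Mathlib
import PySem

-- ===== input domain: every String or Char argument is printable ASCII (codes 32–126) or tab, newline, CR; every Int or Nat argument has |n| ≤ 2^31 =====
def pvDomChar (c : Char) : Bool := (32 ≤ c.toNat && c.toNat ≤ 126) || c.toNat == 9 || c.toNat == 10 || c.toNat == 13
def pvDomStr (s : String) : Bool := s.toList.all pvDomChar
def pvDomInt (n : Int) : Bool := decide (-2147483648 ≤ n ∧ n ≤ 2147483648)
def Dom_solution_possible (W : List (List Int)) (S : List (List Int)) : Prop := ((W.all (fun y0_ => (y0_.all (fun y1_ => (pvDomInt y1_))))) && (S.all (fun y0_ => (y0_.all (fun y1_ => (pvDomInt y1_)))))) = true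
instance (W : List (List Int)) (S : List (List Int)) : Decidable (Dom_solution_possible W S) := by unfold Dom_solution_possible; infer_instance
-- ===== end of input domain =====

-- B replaces A's branch-on-every-position-of-S backtracking by backtracking on the first
-- still-unassigned team only (teams ordered most-constrained-first): a different search order, same Bool.

-- ===== PORT A =====
-- winner[1] != equipe[1] and winner[2] != equipe[2]  (pyGet?: Option-valued; inside Pre_ all teams have length ≥ 3, so both lookups are `some`, exactly Python)
def pvCompat (equipe w : List Int) : Bool :=
  (PySem.List.pyGet? w 1 != PySem.List.pyGet? equipe 1) &&
  (PySem.List.pyGet? w 2 != PySem.List.pyGet? equipe 2)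

def tirage_possible (equipe : List Int) (W : List (List Int)) : List (List Int) :=
  W.filter (fun winner => pvCompat equipe winner)

def pvRemove (winner : List Int) (W : List (List Int)) : List (List Int) :=
  W.filter (fun equipe => equipe != winner)

mutual
def solution_possible (W : List (List Int)) (S : List (List Int)) : Bool :=
  if S.length = 0 then true
  else if S.length = 1 then
    if tirage_possible (S.getD 0 []) W = [] then false else true
  else pvLoopJ W S 0 false
termination_by (S.length, 3, 0)

-- the `for j in range(len(S))` loop of A, accumulator `possible`
def pvLoopJ (W : List (List Int)) (S : List (List Int)) (j : Nat) (possible : Bool) : Bool :=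
  if h : j < S.length then
    pvLoopJ W S (j + 1)
      (if possible then possible
       else
         let Sj := S.getD j []
         let Wp := tirage_possible Sj W
         if Wp.length = 0 then possible
         else pvLoopI W S Sj Wp possible)
  else possible
termination_by (S.length, 2, S.length - j)

-- the inner `for i in range(len(W_possible))` loop; the `Sj ∈ S` test is only a termination
-- guard (Sj is always S[j] with j in range, so it is always true on reachable calls)
def pvLoopI (W : List (List Int)) (S : List (List Int)) (Sj : List Int)
    (Wp : List (List Int)) (possible : Bool) : Bool :=
  match Wp with
  | [] => possible
  | w :: rest =>
      pvLoopI W S Sj rest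
        (possible ||
          (if hmem : Sj ∈ S then solution_possible (pvRemove w W) (pvRemove Sj S) else false))
termination_by (S.length, 1, Wp.length)
decreasing_by
  all_goals simp_wf
  all_goals first
    | exact Prod.Lex.right _ (Prod.Lex.right _ (by omega))
    | exact Prod.Lex.left _ _
        (List.length_filter_lt_length_iff_exists.mpr ⟨Sj, hmem, by simp⟩)
end

-- ===== PORT B =====
-- key: sum(1 for w in W if compatible(s, w))
def pvKey (W : List (List Int)) (s : List Int) : Int :=
  ((W.filter (fun w => pvCompat s w)).length : Int)

-- solve: backtrack on the head of S only; W[:k] + W[k+1:] = take k ++ drop (k+1) (k is an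
-- in-range nonnegative enumerate index, so the slices are exactly take/drop)
def pvSolve (W : List (List Int)) (S : List (List Int)) : Bool :=
  match S with
  | [] => true
  | s :: rest =>
      (PySem.List.enumerate W).any (fun kw =>
        pvCompat s kw.2 &&
          pvSolve (W.take kw.1.toNat ++ W.drop (kw.1.toNat + 1)) rest)

def solution_possible_alt (W : List (List Int)) (S : List (List Int)) : Bool :=
  pvSolve W (PySem.List.sorted S (pvKey W))

-- ===== PRECONDITION & SPEC =====
-- Pre_ excludes (a) teams shorter than 3 entries (unless W or S is empty, where no team is
-- ever indexed), on which Python A raises IndexError, and (b) duplicate teams inside W or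
-- inside S: there A's `remove` drops ALL copies at once, an accident of its implementation
-- (duplicate teams in a draw are malformed input), which B's one-at-a-time assignment does
-- not reproduce.
def Pre_solution_possible (W : List (List Int)) (S : List (List Int)) : Prop :=
  W.Nodup ∧ S.Nodup ∧
    (S = [] ∨ W = [] ∨ ((∀ t ∈ W, 3 ≤ t.length) ∧ (∀ t ∈ S, 3 ≤ t.length)))

instance (W : List (List Int)) (S : List (List Int)) : Decidable (Pre_solution_possible W S) := by
  unfold Pre_solution_possible; infer_instance

def pvWitness_solution_possible : List (List Int) × List (List Int) :=
  ([[1, 1, 1], [2, 2, 2]], [[3, 3, 3]])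

def Spec_solution_possible (W : List (List Int)) (S : List (List Int)) (out : Bool) : Prop :=
  out = solution_possible_alt W S

instance (W : List (List Int)) (S : List (List Int)) (out : Bool) :
    Decidable (Spec_solution_possible W S out) := by
  unfold Spec_solution_possible; infer_instance

-- ===== CLAIM (what is proved, stated in full; the proofs are below) =====
def Claim_equal_solution_possible : Prop :=
  ∀ (W : List (List Int)) (S : List (List Int)), Dom_solution_possible W S →
    Pre_solution_possible W S → Spec_solution_possible W S (solution_possible W S)

-- ===== LEMMAS AND PROOFS =====

-- 'S can be fully drawn against distinct teams of W': one team w per head of S, used up.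
inductive PvM : List (List Int) → List (List Int) → Prop
  | nil (W : List (List Int)) : PvM W []
  | cons {W S : List (List Int)} {s w : List Int} :
      w ∈ W → pvCompat s w = true → PvM (W.erase w) S → PvM W (s :: S)

theorem pvM_swap {W S : List (List Int)} {a b : List Int}
    (h : PvM W (a :: b :: S)) : PvM W (b :: a :: S) := by
  cases h with
  | cons hwa hca h2 =>
  rename_i wa
  cases h2 with
  | cons hwb hcb h3 =>
  rename_i wb
  have hwbW : wb ∈ W := List.mem_of_mem_erase hwb
  have hwaW : wa ∈ W.erase wb := by
    by_cases hab : wa = wb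
    · rw [hab]; rw [← hab] at hwb; rwa [hab] at hwb
    · exact List.mem_erase_of_ne hab |>.mpr hwa
  refine PvM.cons hwbW hcb (PvM.cons hwaW hca ?_)
  rwa [List.erase_comm]

theorem pvM_perm {S S' : List (List Int)} (h : S.Perm S') :
    ∀ W, PvM W S → PvM W S' := by
  induction h with
  | nil => exact fun _ h => h
  | cons x _ ih =>
      intro W hm
      cases hm with
      | cons hw hc hm => exact PvM.cons hw hc (ih _ hm)
  | swap x y l => exact fun W hm => pvM_swap hm
  | trans _ _ ih1 ih2 => exact fun W hm => ih2 _ (ih1 _ hm)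

theorem pvRemove_eq_erase {W : List (List Int)} (h : W.Nodup) (w : List Int) :
    pvRemove w W = W.erase w := by
  rw [pvRemove, List.Nodup.erase_eq_filter h w]

theorem pvM_single_iff {W : List (List Int)} {s : List Int} :
    PvM W [s] ↔ ∃ w ∈ W, pvCompat s w = true := by
  constructor
  · intro h
    cases h with
    | cons hw hc hm => exact ⟨_, hw, hc⟩
  · rintro ⟨w, hw, hc⟩; exact PvM.cons hw hc (PvM.nil _)

theorem pvLoopI_eq {W S : List (List Int)} {Sj : List Int} (hmem : Sj ∈ S) :
    ∀ (Wp : List (List Int)) (p : Bool),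
      pvLoopI W S Sj Wp p =
        (p || Wp.any (fun w => solution_possible (pvRemove w W) (pvRemove Sj S))) := by
  intro Wp
  induction Wp with
  | nil => intro p; rw [pvLoopI.eq_def]; simp
  | cons w rest ih =>
      intro p
      rw [pvLoopI.eq_def]
      simp only [dif_pos hmem]
      rw [ih]
      simp [Bool.or_assoc]

theorem pvLoopJ_true_iff (W S : List (List Int)) :
    ∀ (m j : Nat) (p : Bool), S.length - j ≤ m →
      (pvLoopJ W S j p = true ↔
        (p = true ∨ ∃ j', j ≤ j' ∧ ∃ h : j' < S.length,
          ∃ w ∈ tirage_possible S[j'] W,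
            solution_possible (pvRemove w W) (pvRemove S[j'] S) = true)) := by
  intro m
  induction m with
  | zero =>
      intro j p hm
      have hj : ¬ j < S.length := by omega
      rw [pvLoopJ.eq_def]
      simp only [hj, dite_false]
      constructor
      · intro h; exact Or.inl h
      · rintro (h | ⟨j', hle, hlt, _⟩)
        · exact h
        · omega
  | succ m ih =>
      intro j p hm
      by_cases hj : j < S.length
      · rw [pvLoopJ.eq_def]
        simp only [hj, dite_true]
        have hget : S.getD j [] = S[j] := List.getD_eq_getElem S [] hj
        have hmem : S[j] ∈ S := List.getElem_mem hj
        rw [ih (j + 1) _ (by omega)]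
        by_cases hp : p = true
        · subst hp
          simp
        · replace hp : p = false := by simpa using hp
          subst hp
          simp only [Bool.false_eq_true, if_false]
          by_cases hW : (tirage_possible (S.getD j []) W).length = 0
          · simp only [hW, if_true]
            have hnil : tirage_possible (S.getD j []) W = [] := List.eq_nil_of_length_eq_zero hW
            constructor
            · rintro (h | ⟨j', h1, h2, hrest⟩)
              · simp at h
              · exact Or.inr ⟨j', by omega, h2, hrest⟩
            · rintro (h | ⟨j', h1, h2, w, hw, hsol⟩)
              · simp at h
              · rcases Nat.eq_or_lt_of_le h1 with heq | hlt
                · exfalso; subst heq; rw [hget] at hnil; rw [hnil] at hw; simp at hw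
                · exact Or.inr ⟨j', by omega, h2, w, hw, hsol⟩
          · simp only [hW, if_false]
            rw [hget, pvLoopI_eq hmem]
            simp only [Bool.false_or, List.any_eq_true]
            constructor
            · rintro (⟨w, hw, hsol⟩ | ⟨j', h1, h2, hrest⟩)
              · exact Or.inr ⟨j, le_refl j, hj, w, hw, hsol⟩
              · exact Or.inr ⟨j', by omega, h2, hrest⟩
            · rintro (h | ⟨j', h1, h2, w, hw, hsol⟩)
              · simp at h
              · rcases Nat.eq_or_lt_of_le h1 with heq | hlt
                · subst heq
                  exact Or.inl ⟨w, hw, hsol⟩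
                · exact Or.inr ⟨j', by omega, h2, w, hw, hsol⟩
      · rw [pvLoopJ.eq_def]
        simp only [hj, dite_false]
        constructor
        · intro h; exact Or.inl h
        · rintro (h | ⟨j', hle, hlt, _⟩)
          · exact h
          · omega

theorem pvA_iff : ∀ (n : Nat) (S W : List (List Int)), S.length ≤ n →
    W.Nodup → S.Nodup → (solution_possible W S = true ↔ PvM W S) := by
  intro n
  induction n with
  | zero =>
      intro S W hn _ _
      have : S = [] := List.eq_nil_of_length_eq_zero (by omega)
      subst this
      rw [solution_possible.eq_def]
      simp only [List.length_nil, if_true, true_iff]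
      exact PvM.nil W
  | succ n ih =>
      intro S W hn hWn hSn
      match S with
      | [] =>
          rw [solution_possible.eq_def]
          simp only [List.length_nil, if_true, true_iff]
          exact PvM.nil W
      | [s] =>
          rw [solution_possible.eq_def]
          simp only [List.length_cons, List.length_nil]
          norm_num
          rw [pvM_single_iff]
          constructor
          · intro h
            by_cases hnil : tirage_possible s W = []
            · simp [hnil] at h
            · rcases List.exists_mem_of_ne_nil _ hnil with ⟨w, hw⟩
              rw [tirage_possible, List.mem_filter] at hw
              exact ⟨w, hw.1, hw.2⟩
          · rintro ⟨w, hw, hc⟩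
            have hnil : tirage_possible s W ≠ [] := by
              intro hh
              have : w ∈ tirage_possible s W := by
                rw [tirage_possible, List.mem_filter]; exact ⟨hw, hc⟩
              rw [hh] at this; simp at this
            simp [hnil]
      | s1 :: s2 :: S' =>
          rw [solution_possible.eq_def]
          have hlen : (s1 :: s2 :: S').length = S'.length + 2 := by simp
          simp only [hlen]
          norm_num
          rw [pvLoopJ_true_iff W (s1 :: s2 :: S') (S'.length + 2) 0 false (by simp)]
          simp only [Bool.false_eq_true, false_or, Nat.zero_le, true_and]
          constructor
          · rintro ⟨j', hlt, w, hw, hsol⟩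
            rw [tirage_possible, List.mem_filter] at hw
            have hmem : (s1 :: s2 :: S')[j'] ∈ (s1 :: s2 :: S') := List.getElem_mem hlt
            rw [pvRemove_eq_erase hWn w, pvRemove_eq_erase hSn _] at hsol
            have hlenS : ((s1 :: s2 :: S').erase (s1 :: s2 :: S')[j']).length ≤ n := by
              rw [List.length_erase_of_mem hmem]
              simp at hn ⊢; omega
            have hm : PvM (W.erase w) ((s1 :: s2 :: S').erase (s1 :: s2 :: S')[j']) :=
              (ih _ _ hlenS (hWn.erase w) (hSn.erase _)).mp hsol
            exact pvM_perm (List.perm_cons_erase hmem).symm W (PvM.cons hw.1 hw.2 hm)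
          · intro hm
            cases hm with
            | cons hw hc hm =>
            rename_i w
            refine ⟨0, by omega, w, ?_, ?_⟩
            · rw [tirage_possible, List.mem_filter]
              exact ⟨hw, hc⟩
            · rw [pvRemove_eq_erase hWn w, pvRemove_eq_erase hSn _]
              have her : (s1 :: s2 :: S').erase s1 = s2 :: S' := by simp
              simp only [List.getElem_cons_zero, her]
              refine (ih _ _ ?_ (hWn.erase w) (List.nodup_cons.mp hSn).2).mpr hm
              simp at hn ⊢; omega

theorem pvB_iff : ∀ (S W : List (List Int)), W.Nodup → (pvSolve W S = true ↔ PvM W S) := by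
  intro S
  induction S with
  | nil =>
      intro W _
      simp only [pvSolve, true_iff]
      exact PvM.nil W
  | cons s rest ih =>
      intro W hWn
      rw [pvSolve]
      rw [List.any_eq_true]
      constructor
      · rintro ⟨kw, hkw, hp⟩
        rw [PySem.List.mem_enumerate_iff] at hkw
        rcases hkw with ⟨k, hk, rfl⟩
        simp only [Bool.and_eq_true] at hp
        rcases hp with ⟨hc, hsol⟩
        simp only [Int.zero_add] at hc hsol ⊢
        have htn : ((k : Int)).toNat = k := Int.toNat_natCast k
        rw [htn] at hsol
        have hte : W.take k ++ W.drop (k + 1) = W.eraseIdx k :=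
          (List.eraseIdx_eq_take_drop_succ W k).symm
        rw [hte] at hsol
        have her : W.eraseIdx k = W.erase W[k] := (hWn.erase_getElem k hk).symm
        rw [her] at hsol
        have hm : PvM (W.erase W[k]) rest := (ih _ (hWn.erase _)).mp hsol
        exact PvM.cons (List.getElem_mem hk) hc hm
      · intro hm
        cases hm with
        | cons hw hc hm =>
        rename_i w
        obtain ⟨k, hk, hkeq⟩ := List.mem_iff_getElem.mp hw
        subst hkeq
        refine ⟨((k : Int), W[k]), ?_, ?_⟩
        · rw [PySem.List.mem_enumerate_iff]
          exact ⟨k, hk, by simp⟩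
        · simp only [Bool.and_eq_true]
          refine ⟨hc, ?_⟩
          have htn : ((k : Int)).toNat = k := Int.toNat_natCast k
          rw [htn]
          have hte : W.take k ++ W.drop (k + 1) = W.eraseIdx k :=
            (List.eraseIdx_eq_take_drop_succ W k).symm
          rw [hte, ← hWn.erase_getElem k hk]
          exact (ih _ (hWn.erase _)).mpr hm

-- ===== VERDICT (by name: the statement is the Claim_ definition above) =====
theorem solution_possible_spec : Claim_equal_solution_possible := by
  unfold Claim_equal_solution_possible
  intro W S _ hpre
  rcases hpre with ⟨hWn, hSn, -⟩
  unfold Spec_solution_possible solution_possible_alt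
  have hperm : (PySem.List.sorted S (pvKey W)).Perm S := PySem.List.sorted_perm S (pvKey W) false
  have hA : solution_possible W S = true ↔ PvM W S :=
    pvA_iff S.length S W (le_refl _) hWn hSn
  have hB : pvSolve W (PySem.List.sorted S (pvKey W)) = true ↔ PvM W S := by
    rw [pvB_iff _ _ hWn]
    exact ⟨pvM_perm hperm W, pvM_perm hperm.symm W⟩
  rw [Bool.eq_iff_iff, hA, hB]
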